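-- pv_equiv track=rewrite | github.com/Nasr1ddine/local-rag-system | src/ingestion/parser.py | _detect_chapter
-- ===== SOURCE A (Python) =====
-- def _detect_chapter(toc: list, current_page: int) -> str:
--     """Find the most recent chapter title from TOC for the given page."""
--     current_chapter = None
--     for item in toc:
--         level, title, page = item
--         if page <= current_page:
--             if level == 1:
--                 current_chapter = title
--         else:
--             break
--     return current_chapter
-- ===== SOURCE B (Python) =====
-- from itertools import takewhile
--
--
-- def _detect_chapter(toc: list, current_page: int) -> str:
--     """Find the most recent chapter title from TOC for the given page."""
--     in_range = list(takewhile(lambda item: item[2] <= current_page, toc))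
--     for level, title, page in reversed(in_range):
--         if level == 1:
--             return title
--     return None
-- ===== Notes on version B (the rewrite author's own statement) =====
-- stated objective: alternative
-- what changed: Replaces the single accumulating loop-with-break by two passes: a takewhile cutoff of the in-range prefix, then a backward scan of that prefix returning the first level-1 title.
import Mathlib
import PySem

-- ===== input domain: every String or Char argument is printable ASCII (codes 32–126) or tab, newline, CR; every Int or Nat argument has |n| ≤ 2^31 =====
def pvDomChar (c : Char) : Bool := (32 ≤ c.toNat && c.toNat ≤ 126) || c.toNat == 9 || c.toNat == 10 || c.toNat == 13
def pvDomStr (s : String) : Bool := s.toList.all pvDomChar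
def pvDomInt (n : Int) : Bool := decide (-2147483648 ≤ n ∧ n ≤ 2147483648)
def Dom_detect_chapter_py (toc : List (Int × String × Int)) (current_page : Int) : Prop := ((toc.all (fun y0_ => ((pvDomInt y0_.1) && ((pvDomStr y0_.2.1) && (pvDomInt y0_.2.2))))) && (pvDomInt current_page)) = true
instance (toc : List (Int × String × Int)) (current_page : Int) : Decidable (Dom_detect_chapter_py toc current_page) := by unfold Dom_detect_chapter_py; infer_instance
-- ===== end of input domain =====

-- B replaces A's accumulating loop-with-break by two passes (takewhile cutoff, then backward scan for the first level-1 entry); same cost, different decomposition.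


-- ===== PORT A =====
-- A's loop: accumulate the latest level-1 title, break on the first page > current_page.
def detectGoA (cp : Int) : List (Int × String × Int) → Option String → Option String
  | [], acc => acc
  | (level, title, page) :: rest, acc =>
    if page ≤ cp then detectGoA cp rest (if level = 1 then some title else acc)
    else acc

def detect_chapter_py (toc : List (Int × String × Int)) (current_page : Int) : Option String :=
  detectGoA current_page toc none

-- ===== PORT B =====
-- B: takewhile cutoff of the in-range prefix, then a backward scan for the first level-1 entry.
def detect_chapter_py_alt (toc : List (Int × String × Int)) (current_page : Int) : Option String :=
  let in_range := toc.takeWhile (fun item => item.2.2 ≤ current_page)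
  match in_range.reverse.find? (fun item => item.1 = 1) with
  | some item => some item.2.1
  | none => none

-- ===== PRECONDITION & SPEC =====
def Spec_detect_chapter_py (toc : List (Int × String × Int)) (current_page : Int) (out : Option String) : Prop := out = detect_chapter_py_alt toc current_page
instance (toc : List (Int × String × Int)) (current_page : Int) (out : Option String) : Decidable (Spec_detect_chapter_py toc current_page out) := by unfold Spec_detect_chapter_py; infer_instance

-- ===== CLAIM (what is proved, stated in full; the proofs are below) =====
def Claim_equal_detect_chapter_py : Prop := ∀ (toc : List (Int × String × Int)) (current_page : Int), Dom_detect_chapter_py toc current_page → Spec_detect_chapter_py toc current_page (detect_chapter_py toc current_page)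

-- ===== LEMMAS AND PROOFS =====
theorem detectGoA_eq (cp : Int) (l : List (Int × String × Int)) (acc : Option String) :
    detectGoA cp l acc =
      match (l.takeWhile (fun item => item.2.2 ≤ cp)).reverse.find?
          (fun item => item.1 = 1) with
      | some item => some item.2.1
      | none => acc := by
  induction l generalizing acc with
  | nil => simp [detectGoA]
  | cons x rest ih =>
    obtain ⟨level, title, page⟩ := x
    by_cases h : page ≤ cp
    · rw [detectGoA, if_pos h, ih, List.takeWhile_cons]
      simp only [h, decide_true, if_true, List.reverse_cons, List.find?_append]
      cases hf : (rest.takeWhile (fun item => item.2.2 ≤ cp)).reverse.find?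
          (fun item => item.1 = 1) with
      | some it => simp
      | none =>
        by_cases hl : level = 1 <;> simp [hl, List.find?]
    · simp [detectGoA, h]

-- ===== VERDICT (by name: the statement is the Claim_ definition above) =====
theorem detect_chapter_py_spec : Claim_equal_detect_chapter_py := by
  intro toc cp _
  unfold Spec_detect_chapter_py detect_chapter_py detect_chapter_py_alt
  rw [detectGoA_eq]
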